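-- pv_equiv track=rewrite | github.com/Mr-Meesseek/fastapi_backend | fastapi/text_processing.py | normalize3_text
-- ===== SOURCE A (Python) =====
-- ar9am = {'3': 'ع', '5': 'خ', '9': 'ق', '7': 'ح'}
--
-- def normalize3_text(text):
--     normalized_text = ""
--     for i, char in enumerate(text):
--         if char.isdigit():
--             if i > 0 and text[i - 1].isalpha():
--                 normalized_text += ar9am.get(char, char)
--             elif i < len(text) - 1 and text[i + 1].isalpha():
--                 normalized_text += ar9am.get(char, char)
--             else:
--                 normalized_text += char
--         else:
--             normalized_text += char
--     return normalized_text.lower()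
-- ===== SOURCE B (Python) =====
-- ar9am = {'3': 'ع', '5': 'خ', '9': 'ق', '7': 'ح'}
--
-- def normalize3_text(text):
--     # First pass: letters mark their neighbour positions.
--     marked = set()
--     for i, char in enumerate(text):
--         if char.isalpha():
--             marked.add(i - 1)
--             marked.add(i + 1)
--     # Second pass: substitute the four ar9am digits at marked positions.
--     out = []
--     for i, char in enumerate(text):
--         if i in marked and char in ar9am:
--             out.append(ar9am[char])
--         else:
--             out.append(char)
--     return ''.join(out).lower()
-- ===== Notes on version B (the rewrite author's own statement) =====
-- stated objective: alternative
-- what changed: Replaces the per-digit neighbour probing (indexing text[i-1]/text[i+1] inside the loop) by an inverted two-pass scheme: a first pass over the letters builds a set of positions adjacent to a letter, a second pass substitutes the four ar9am digits exactly at those marked positions.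
import Mathlib
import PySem

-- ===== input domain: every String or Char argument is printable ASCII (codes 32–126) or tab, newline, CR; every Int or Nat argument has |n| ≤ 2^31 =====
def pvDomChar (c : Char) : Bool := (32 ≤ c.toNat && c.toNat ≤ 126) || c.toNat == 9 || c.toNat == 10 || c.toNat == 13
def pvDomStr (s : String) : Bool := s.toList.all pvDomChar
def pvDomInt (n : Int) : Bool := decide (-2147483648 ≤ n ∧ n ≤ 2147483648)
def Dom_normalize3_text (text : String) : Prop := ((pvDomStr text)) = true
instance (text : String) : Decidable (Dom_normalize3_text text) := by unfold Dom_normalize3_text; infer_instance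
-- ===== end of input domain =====

-- B restates A by a different decomposition: letters mark their neighbour positions in a set
-- in a first pass, a second pass substitutes the four ar9am digits at marked positions
-- (alternative decomposition, no speed claim).

-- ===== PORT A =====

-- module-level constant ar9am
def ar9am : PySem.Dict Char Char :=
  PySem.Dict.mk [('3', 'ع'), ('5', 'خ'), ('9', 'ق'), ('7', 'ح')]

-- text[j].isalpha() under a guard that keeps j in range (Python raises out of range;
-- the `none` branch is unreachable in A, where the guards i>0 / i<len-1 hold)
def isalphaAt (cs : List Char) (j : Int) : Bool :=
  match PySem.List.pyGet? cs j with
  | some c => PySem.Chars.isalpha c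
  | none => false

def normalize3_text (text : String) : String :=
  let cs := text.toList
  let normalized :=
    (PySem.List.enumerate cs).foldl (fun acc p =>
      if PySem.Chars.isdigit p.2 then
        if p.1 > 0 && isalphaAt cs (p.1 - 1) then
          acc ++ [ar9am.getD p.2 p.2]
        else if p.1 < (cs.length : Int) - 1 && isalphaAt cs (p.1 + 1) then
          acc ++ [ar9am.getD p.2 p.2]
        else
          acc ++ [p.2]
      else
        acc ++ [p.2]) []
  PySem.Str.lower (String.ofList normalized)

-- ===== PORT B =====

def normalize3_text_alt (text : String) : String :=
  let cs := text.toList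
  -- first pass: each letter marks the position before and after it
  let marked : PySem.Set Int :=
    (PySem.List.enumerate cs).foldl (fun s p =>
      if PySem.Chars.isalpha p.2 then
        PySem.Set.add (PySem.Set.add s (p.1 - 1)) (p.1 + 1)
      else s) PySem.Set.empty
  -- second pass: substitute the four ar9am digits at marked positions
  let out :=
    (PySem.List.enumerate cs).foldl (fun acc p =>
      if PySem.Set.contains marked p.1 && ar9am.contains p.2 then
        -- ar9am[char]: the guard ensures the key is present, so `none` is unreachable
        acc ++ [(ar9am.get? p.2).getD p.2]
      else
        acc ++ [p.2]) []
  PySem.Str.lower (String.ofList out)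

-- ===== PRECONDITION & SPEC =====
def Spec_normalize3_text (text : String) (out : String) : Prop := out = normalize3_text_alt text
instance (text : String) (out : String) : Decidable (Spec_normalize3_text text out) := by unfold Spec_normalize3_text; infer_instance

-- ===== CLAIM (what is proved, stated in full; the proofs are below) =====
def Claim_equal_normalize3_text : Prop := ∀ (text : String), Dom_normalize3_text text → Spec_normalize3_text text (normalize3_text text)

-- ===== LEMMAS AND PROOFS =====

-- the per-position character A emits
def emitA (cs : List Char) (p : Int × Char) : Char :=
  if PySem.Chars.isdigit p.2 then
    if p.1 > 0 && isalphaAt cs (p.1 - 1) then ar9am.getD p.2 p.2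
    else if p.1 < (cs.length : Int) - 1 && isalphaAt cs (p.1 + 1) then ar9am.getD p.2 p.2
    else p.2
  else p.2

-- B's marked set and per-position character
def markedOf (cs : List Char) : PySem.Set Int :=
  (PySem.List.enumerate cs).foldl (fun s p =>
    if PySem.Chars.isalpha p.2 then
      PySem.Set.add (PySem.Set.add s (p.1 - 1)) (p.1 + 1)
    else s) PySem.Set.empty

def emitB (cs : List Char) (p : Int × Char) : Char :=
  if PySem.Set.contains (markedOf cs) p.1 && ar9am.contains p.2 then
    (ar9am.get? p.2).getD p.2
  else p.2

lemma foldA_eq_map (cs : List Char) :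
    (PySem.List.enumerate cs).foldl (fun acc p =>
      if PySem.Chars.isdigit p.2 then
        if p.1 > 0 && isalphaAt cs (p.1 - 1) then acc ++ [ar9am.getD p.2 p.2]
        else if p.1 < (cs.length : Int) - 1 && isalphaAt cs (p.1 + 1) then acc ++ [ar9am.getD p.2 p.2]
        else acc ++ [p.2]
      else acc ++ [p.2]) [] = (PySem.List.enumerate cs).map (emitA cs) := by
  rw [PySem.List.foldl_congr_mem (g := fun acc p => acc ++ [emitA cs p])]
  · exact PySem.List.foldl_append_singleton_eq_map _ _ _
  · intro acc p _
    unfold emitA; split_ifs <;> rfl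

lemma foldB_eq_map (cs : List Char) :
    (PySem.List.enumerate cs).foldl (fun acc p =>
      if PySem.Set.contains (markedOf cs) p.1 && ar9am.contains p.2 then
        acc ++ [(ar9am.get? p.2).getD p.2]
      else acc ++ [p.2]) [] = (PySem.List.enumerate cs).map (emitB cs) := by
  rw [PySem.List.foldl_congr_mem (g := fun acc p => acc ++ [emitB cs p])]
  · exact PySem.List.foldl_append_singleton_eq_map _ _ _
  · intro acc p _
    unfold emitB; split_ifs <;> rfl

-- membership in the fold that builds the marked set
lemma mem_markFold (l : List (Int × Char)) (s : PySem.Set Int) (x : Int) :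
    x ∈ l.foldl (fun s p =>
        if PySem.Chars.isalpha p.2 then
          PySem.Set.add (PySem.Set.add s (p.1 - 1)) (p.1 + 1)
        else s) s ↔
      x ∈ s ∨ ∃ p ∈ l, PySem.Chars.isalpha p.2 = true ∧ (x = p.1 - 1 ∨ x = p.1 + 1) := by
  induction l generalizing s with
  | nil => simp
  | cons q l ih =>
    simp only [List.foldl_cons]
    by_cases hq : PySem.Chars.isalpha q.2 = true
    · simp [hq, ih, PySem.Set.mem_add, or_assoc]
    · simp [hq, ih]

lemma mem_marked_iff (cs : List Char) (x : Int) :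
    x ∈ markedOf cs ↔
      ∃ (k : Nat) (h : k < cs.length),
        PySem.Chars.isalpha cs[k] = true ∧ (x = (k : Int) - 1 ∨ x = (k : Int) + 1) := by
  unfold markedOf
  rw [mem_markFold]
  constructor
  · rintro (h | ⟨p, hp, ha, hx⟩)
    · simp [PySem.Set.empty] at h
    · obtain ⟨k, hk, rfl⟩ := (PySem.List.mem_enumerate_iff _ _ _).1 hp
      exact ⟨k, hk, by simpa using ha, by simpa using hx⟩
  · rintro ⟨k, hk, ha, hx⟩
    refine Or.inr ⟨((k : Int), cs[k]), ?_, ha, by simpa using hx⟩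
    exact (PySem.List.mem_enumerate_iff _ _ _).2 ⟨k, hk, by simp⟩

-- ar9am facts
lemma ar9am_keys (c : Char) (h : ar9am.contains c = true) :
    c = '3' ∨ c = '5' ∨ c = '9' ∨ c = '7' := by
  simp [ar9am, PySem.Dict.contains] at h
  tauto

lemma ar9am_contains_imp_digit (c : Char) (h : ar9am.contains c = true) :
    PySem.Chars.isdigit c = true := by
  rcases ar9am_keys c h with rfl | rfl | rfl | rfl <;> decide

lemma ar9am_get?_of_not_contains (c : Char) (h : ar9am.contains c = false) :
    ar9am.get? c = none := by
  rw [PySem.Dict.contains_eq_isSome_get?] at h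
  simpa using h

lemma isalphaAt_of_lt (cs : List Char) (k : Nat) (hk : k < cs.length) :
    isalphaAt cs (k : Int) = PySem.Chars.isalpha cs[k] := by
  unfold isalphaAt
  rw [PySem.List.pyGet?_natCast, List.getElem?_eq_getElem hk]

-- the Set.contains test agrees with A's neighbour probing at in-range indices
lemma marked_iff (cs : List Char) (k : Nat) (hk : k < cs.length) :
    PySem.Set.contains (markedOf cs) (k : Int) = true ↔
      ((0 : Int) < (k : Int) ∧ isalphaAt cs ((k : Int) - 1) = true) ∨
      ((k : Int) < (cs.length : Int) - 1 ∧ isalphaAt cs ((k : Int) + 1) = true) := by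
  rw [PySem.Set.contains_iff, mem_marked_iff]
  constructor
  · rintro ⟨j, hj, ha, hx | hx⟩
    · -- k = j - 1, so the letter is on the right
      have hjk : j = k + 1 := by omega
      subst hjk
      refine Or.inr ⟨by omega, ?_⟩
      have hcast : (k : Int) + 1 = ((k + 1 : Nat) : Int) := by omega
      rw [hcast, isalphaAt_of_lt cs (k + 1) hj]
      exact ha
    · -- k = j + 1, so the letter is on the left
      have hjk : j = k - 1 ∧ 0 < k := by omega
      refine Or.inl ⟨by omega, ?_⟩
      have hcast : (k : Int) - 1 = (j : Int) := by omega
      rw [hcast, isalphaAt_of_lt cs j hj]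
      exact ha
  · rintro (⟨h0, ha⟩ | ⟨h1, ha⟩)
    · have hk1 : k - 1 < cs.length := by omega
      have hcast : (k : Int) - 1 = ((k - 1 : Nat) : Int) := by omega
      rw [hcast, isalphaAt_of_lt cs (k - 1) hk1] at ha
      exact ⟨k - 1, hk1, ha, Or.inr (by omega)⟩
    · have hk1 : k + 1 < cs.length := by omega
      have hcast : (k : Int) + 1 = ((k + 1 : Nat) : Int) := by omega
      rw [hcast, isalphaAt_of_lt cs (k + 1) hk1] at ha
      exact ⟨k + 1, hk1, ha, Or.inl (by omega)⟩

lemma emitA_eq_emitB (cs : List Char) (p : Int × Char)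
    (hp : p ∈ PySem.List.enumerate cs) : emitA cs p = emitB cs p := by
  obtain ⟨k, hk, rfl⟩ := (PySem.List.mem_enumerate_iff _ _ _).1 hp
  simp only [zero_add]
  unfold emitA emitB
  rcases Bool.eq_false_or_eq_true (ar9am.contains cs[k]) with hco | hco
  case _ => -- an ar9am key (handled below, after the non-key case)
    have hd := ar9am_contains_imp_digit _ hco
    rw [hd, if_pos rfl, hco, Bool.and_true, PySem.Dict.getD_eq_get?_getD]
    rcases Bool.eq_false_or_eq_true (PySem.Set.contains (markedOf cs) (k : Int)) with hm | hm
    case _ => -- marked position: one of the neighbour tests fires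
      rw [hm]
      rcases (marked_iff cs k hk).1 hm with ⟨h0, ha⟩ | ⟨h1, ha⟩
      · have e1 : ((k : Int) > 0 && isalphaAt cs ((k : Int) - 1)) = true := by
          simp [ha]; omega
        rw [e1]
        simp
      · rcases Bool.eq_false_or_eq_true ((k : Int) > 0 && isalphaAt cs ((k : Int) - 1)) with h | h
        case _ =>
          rw [h]
          simp
        case _ =>
          have e2 : ((k : Int) < (cs.length : Int) - 1 && isalphaAt cs ((k : Int) + 1)) = true := by
            simp [ha]; omega
          rw [h, e2]
          simp
    case _ => -- unmarked position: neither neighbour test fires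
      have hnot : ¬ (((0 : Int) < (k : Int) ∧ isalphaAt cs ((k : Int) - 1) = true) ∨
          ((k : Int) < (cs.length : Int) - 1 ∧ isalphaAt cs ((k : Int) + 1) = true)) := by
        intro h
        rw [← marked_iff cs k hk] at h
        rw [hm] at h
        exact Bool.false_ne_true h
      push_neg at hnot
      obtain ⟨h1, h2⟩ := hnot
      rw [hm]
      have e1 : ((k : Int) > 0 && isalphaAt cs ((k : Int) - 1)) = false := by
        rcases Bool.eq_false_or_eq_true (isalphaAt cs ((k : Int) - 1)) with h | h
        · by_cases hp : (0 : Int) < (k : Int)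
          · exact absurd h (h1 hp)
          · rw [Bool.and_eq_false_iff]
            left
            simpa using hp
        · simp [h]
      have e2 : ((k : Int) < (cs.length : Int) - 1 && isalphaAt cs ((k : Int) + 1)) = false := by
        rcases Bool.eq_false_or_eq_true (isalphaAt cs ((k : Int) + 1)) with h | h
        · by_cases hp : (k : Int) < (cs.length : Int) - 1
          · exact absurd h (h2 hp)
          · rw [Bool.and_eq_false_iff]
            left
            simpa using hp
        · simp [h]
      rw [e1, e2]
      simp
  case _ => -- not an ar9am key: both emit the character unchanged
    rw [hco]
    simp only [Bool.and_false, Bool.false_eq_true, if_false]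
    rw [PySem.Dict.getD_eq_get?_getD, ar9am_get?_of_not_contains _ hco]
    split_ifs <;> rfl

-- ===== VERDICT (by name: the statement is the Claim_ definition above) =====
theorem normalize3_text_spec : Claim_equal_normalize3_text := by
  intro text _
  unfold Spec_normalize3_text normalize3_text normalize3_text_alt
  simp only []
  have hM : (List.foldl (fun (s : PySem.Set Int) (p : Int × Char) =>
      if PySem.Chars.isalpha p.2 = true then
        PySem.Set.add (PySem.Set.add s (p.1 - 1)) (p.1 + 1)
      else s) PySem.Set.empty (PySem.List.enumerate text.toList)) = markedOf text.toList := rfl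
  rw [hM, foldA_eq_map, foldB_eq_map]
  congr 2
  exact List.map_congr_left (fun p hp => emitA_eq_emitB text.toList p hp)
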